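-- pv_equiv track=rewrite | github.com/Samuel2910/score-prediction | app.py | get_binary_team_features
-- ===== SOURCE A (Python) =====
-- def get_binary_team_features(batting_team, bowling_team):
--     team_names = ['Chennai Super Kings', 'Delhi Daredevils', 'Kings XI Punjab',
--                   'Kolkata Knight Riders', 'Mumbai Indians', 'Rajasthan Royals',
--                   'Royal Challengers Bangalore', 'Sunrisers Hyderabad']
--     team_features = []
--     for team in team_names:
--         if team == batting_team:
--             team_features.append(1)
--         else:
--             team_features.append(0)
--         if team == bowling_team:
--             team_features.append(1)
--         else:
--             team_features.append(0)
--     return team_features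
-- ===== SOURCE B (Python) =====
-- def get_binary_team_features(batting_team, bowling_team):
--     team_names = ['Chennai Super Kings', 'Delhi Daredevils', 'Kings XI Punjab',
--                   'Kolkata Knight Riders', 'Mumbai Indians', 'Rajasthan Royals',
--                   'Royal Challengers Bangalore', 'Sunrisers Hyderabad']
--     features = [0] * 16
--     if batting_team in team_names:
--         features[2 * team_names.index(batting_team)] = 1
--     if bowling_team in team_names:
--         features[2 * team_names.index(bowling_team) + 1] = 1
--     return features
-- ===== Notes on version B (the rewrite author's own statement) =====
-- stated objective: alternative
-- what changed: Instead of looping over all 8 teams appending one of two flags per comparison, B pre-allocates a list of 16 zeros and writes 1 directly at the two positions found by membership-guarded index lookups.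
import Mathlib
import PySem

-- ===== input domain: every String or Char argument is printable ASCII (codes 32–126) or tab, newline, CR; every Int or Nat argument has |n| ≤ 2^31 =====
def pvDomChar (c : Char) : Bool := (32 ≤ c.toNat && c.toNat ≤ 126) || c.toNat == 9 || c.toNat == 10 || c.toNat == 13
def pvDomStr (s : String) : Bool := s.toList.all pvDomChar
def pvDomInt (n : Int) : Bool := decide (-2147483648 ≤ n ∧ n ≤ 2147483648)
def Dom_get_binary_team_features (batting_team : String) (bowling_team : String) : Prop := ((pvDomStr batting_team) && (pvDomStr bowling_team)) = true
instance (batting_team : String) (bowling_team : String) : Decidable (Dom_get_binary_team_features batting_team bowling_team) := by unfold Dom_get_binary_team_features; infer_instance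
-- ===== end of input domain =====

-- B replaces A's append-per-comparison loop by a pre-sized list of 16 zeros with two
-- membership-guarded direct positional writes (objective: alternative decomposition).

def pvTeamNames : List String :=
  ["Chennai Super Kings", "Delhi Daredevils", "Kings XI Punjab",
   "Kolkata Knight Riders", "Mumbai Indians", "Rajasthan Royals",
   "Royal Challengers Bangalore", "Sunrisers Hyderabad"]

-- ===== PORT A =====
def get_binary_team_features (batting_team : String) (bowling_team : String) : List Int :=
  pvTeamNames.foldl
    (fun team_features team =>
      (team_features ++ [if team == batting_team then (1 : Int) else 0])
        ++ [if team == bowling_team then (1 : Int) else 0])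
    []

-- ===== PORT B =====
-- 'if x in team_names: features[2*team_names.index(x)] = 1' is ported as a match on
-- PySem.List.index? (some i ↔ membership; .index never raises under the guard).
def get_binary_team_features_alt (batting_team : String) (bowling_team : String) : List Int :=
  let features : List Int := List.replicate 16 0
  let features :=
    match PySem.List.index? pvTeamNames batting_team with
    | some i => features.set (2 * i) 1
    | none => features
  match PySem.List.index? pvTeamNames bowling_team with
  | some i => features.set (2 * i + 1) 1
  | none => features

-- ===== PRECONDITION & SPEC =====
def Spec_get_binary_team_features (batting_team : String) (bowling_team : String) (out : List Int) : Prop := out = get_binary_team_features_alt batting_team bowling_team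
instance (batting_team : String) (bowling_team : String) (out : List Int) : Decidable (Spec_get_binary_team_features batting_team bowling_team out) := by unfold Spec_get_binary_team_features; infer_instance

-- ===== CLAIM (what is proved, stated in full; the proofs are below) =====
def Claim_equal_get_binary_team_features : Prop := ∀ (batting_team : String) (bowling_team : String), Dom_get_binary_team_features batting_team bowling_team → Spec_get_binary_team_features batting_team bowling_team (get_binary_team_features batting_team bowling_team)

-- ===== LEMMAS AND PROOFS =====

-- proof-only helpers: the two guarded positional writes of B, abstracted over the lookup result
def pvSetEven (o : Option Nat) (l : List Int) : List Int :=
  match o with | some i => l.set (2 * i) 1 | none => l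
def pvSetOdd (o : Option Nat) (l : List Int) : List Int :=
  match o with | some i => l.set (2 * i + 1) 1 | none => l

lemma alt_eq_marks (bat bowl : String) :
    get_binary_team_features_alt bat bowl =
      pvSetOdd (PySem.List.index? pvTeamNames bowl)
        (pvSetEven (PySem.List.index? pvTeamNames bat) (List.replicate 16 0)) := by
  unfold get_binary_team_features_alt pvSetEven pvSetOdd
  cases PySem.List.index? pvTeamNames bat <;> cases PySem.List.index? pvTeamNames bowl <;> rfl

lemma pvSetEven_shift (o : Option Nat) (a b : Int) (l : List Int) :
    pvSetEven (o.map (· + 1)) (a :: b :: l) = a :: b :: pvSetEven o l := by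
  cases o with
  | none => rfl
  | some i => simp [pvSetEven, Nat.mul_succ]

lemma pvSetOdd_shift (o : Option Nat) (a b : Int) (l : List Int) :
    pvSetOdd (o.map (· + 1)) (a :: b :: l) = a :: b :: pvSetOdd o l := by
  cases o with
  | none => rfl
  | some i => simp [pvSetOdd, Nat.mul_succ]

lemma foldA (f g : String → Int) :
    ∀ (l : List String) (acc : List Int),
      l.foldl (fun team_features team => (team_features ++ [f team]) ++ [g team]) acc
        = acc ++ l.flatMap (fun t => [f t, g t]) := by
  intro l
  induction l with
  | nil => simp
  | cons t rest ih =>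
    intro acc
    rw [List.foldl_cons, ih]
    simp [List.flatMap_cons]

lemma key (bat bowl : String) :
    ∀ (names : List String), names.Nodup →
      names.flatMap (fun t => [if t == bat then (1 : Int) else 0, if t == bowl then (1 : Int) else 0])
        = pvSetOdd (PySem.List.index? names bowl)
            (pvSetEven (PySem.List.index? names bat) (List.replicate (2 * names.length) 0)) := by
  intro names
  induction names with
  | nil => intro _; simp [pvSetEven, pvSetOdd, PySem.List.index?_eq_idxOf?]
  | cons t rest ih =>
    intro hnd
    obtain ⟨htr, hrest⟩ := List.nodup_cons.mp hnd
    have hrep : List.replicate (2 * (t :: rest).length) (0 : Int)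
        = 0 :: 0 :: List.replicate (2 * rest.length) 0 := by
      simp [List.length_cons, Nat.mul_succ, List.replicate_succ]
    by_cases hb : t = bat
    · subst hb
      have hnone : PySem.List.index? rest t = none :=
        (PySem.List.index?_eq_none_iff rest t).mpr htr
      by_cases hw : t = bowl
      · subst hw
        rw [List.flatMap_cons, ih hrest, hnone, hrep, PySem.List.index?_cons_self]
        simp [pvSetEven, pvSetOdd]
      · have hc : PySem.List.index? (t :: rest) bowl
            = (PySem.List.index? rest bowl).map (· + 1) :=
          PySem.List.index?_cons_of_ne rest hw
        rw [List.flatMap_cons, ih hrest, hnone, hrep, PySem.List.index?_cons_self, hc]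
        have h1 : pvSetEven (some 0) (0 :: 0 :: List.replicate (2 * rest.length) (0 : Int))
            = 1 :: 0 :: List.replicate (2 * rest.length) 0 := by simp [pvSetEven]
        rw [h1, pvSetOdd_shift]
        simp [pvSetEven, hw]
    · have hcb : PySem.List.index? (t :: rest) bat
          = (PySem.List.index? rest bat).map (· + 1) :=
        PySem.List.index?_cons_of_ne rest hb
      by_cases hw : t = bowl
      · subst hw
        have hnone : PySem.List.index? rest t = none :=
          (PySem.List.index?_eq_none_iff rest t).mpr htr
        rw [List.flatMap_cons, ih hrest, hnone, hrep, PySem.List.index?_cons_self, hcb,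
          pvSetEven_shift]
        have h1 : pvSetOdd (some 0)
              (0 :: 0 :: pvSetEven (PySem.List.index? rest bat) (List.replicate (2 * rest.length) (0 : Int)))
            = 0 :: 1 :: pvSetEven (PySem.List.index? rest bat) (List.replicate (2 * rest.length) 0) := by
          simp [pvSetOdd]
        rw [h1]
        simp [pvSetOdd, hb]
      · have hcw : PySem.List.index? (t :: rest) bowl
            = (PySem.List.index? rest bowl).map (· + 1) :=
          PySem.List.index?_cons_of_ne rest hw
        rw [List.flatMap_cons, ih hrest, hrep, hcb, hcw, pvSetEven_shift, pvSetOdd_shift]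
        simp [hb, hw]

-- ===== VERDICT (by name: the statement is the Claim_ definition above) =====
theorem get_binary_team_features_spec : Claim_equal_get_binary_team_features := by
  intro bat bowl _
  unfold Spec_get_binary_team_features get_binary_team_features
  rw [foldA, List.nil_append, key bat bowl pvTeamNames (by decide), alt_eq_marks]
  rfl
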